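-- pv_equiv track=rewrite | github.com/Ace1928/eidosian_forge | archive_forge/src/archive_forge/func_fs_cothub_bbh_match_answer.py | fs_cothub_bbh_match_answer
-- ===== SOURCE A (Python) =====
-- def fs_cothub_bbh_match_answer(task_data, response):
--     ans_line = response.split('answer is ')
--     if len(ans_line) == 1:
--         return (False, response)
--     else:
--         ans = ans_line[-1].strip()
--     if task_data['options']:
--         options = ['(A)', '(B)', '(C)', '(D)', '(E)', '(F)', '(G)', '(H)', '(I)', '(J)', '(K)', '(L)', '(M)', '(N)', '(O)', '(P)', '(Q)', '(R)', '(S)', '(T)', '(U)', '(V)', '(W)', '(X)', '(Y)', '(Z)']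
--         for option in options:
--             if option in ans:
--                 return (True, option)
--         return (False, ans)
--     else:
--         if len(ans) and ans[-1] == '.':
--             ans = ans[:-1]
--         return (True, ans)
-- ===== SOURCE B (Python) =====
-- def fs_cothub_bbh_match_answer(task_data, response):
--     parts = response.split('answer is ')
--     if len(parts) == 1:
--         return (False, response)
--     ans = parts[-1].strip()
--     if task_data['options']:
--         best = None
--         for i in range(len(ans) - 2):
--             if ans[i] == '(' and 'A' <= ans[i + 1] <= 'Z' and ans[i + 2] == ')':
--                 c = ans[i + 1]
--                 if best is None or c < best:
--                     best = c
--         if best is not None: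
--             return (True, '(' + best + ')')
--         return (False, ans)
--     else:
--         if len(ans) and ans[-1] == '.':
--             ans = ans[:-1]
--         return (True, ans)
-- ===== Notes on version B (the rewrite author's own statement) =====
-- stated objective: alternative
-- what changed: In the options branch, the 26 ordered substring probes ('(A)' in ans, '(B)' in ans, ...) are replaced by a single left-to-right scan of ans that collects every '(X)' window with X uppercase and keeps the alphabetically smallest letter; the outer parsing is unchanged.
import Mathlib
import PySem

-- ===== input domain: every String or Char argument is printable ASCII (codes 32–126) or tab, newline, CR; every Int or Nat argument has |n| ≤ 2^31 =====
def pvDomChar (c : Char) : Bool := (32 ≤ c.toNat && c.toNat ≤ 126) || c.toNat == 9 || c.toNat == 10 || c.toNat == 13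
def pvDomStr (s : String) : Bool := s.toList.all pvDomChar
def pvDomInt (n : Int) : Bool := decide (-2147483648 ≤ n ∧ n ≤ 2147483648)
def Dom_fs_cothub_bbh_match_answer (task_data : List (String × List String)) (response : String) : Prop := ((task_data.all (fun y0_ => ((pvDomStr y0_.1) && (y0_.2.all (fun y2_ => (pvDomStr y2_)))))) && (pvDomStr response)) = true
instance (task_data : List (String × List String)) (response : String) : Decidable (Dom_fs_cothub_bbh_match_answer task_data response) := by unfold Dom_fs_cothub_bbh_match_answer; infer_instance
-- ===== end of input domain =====

-- B replaces A's 26 ordered substring probes by one left-to-right scan of ans that keeps the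
-- alphabetically smallest '(X)' window (X uppercase); the outer parsing is unchanged ("alternative").

-- ===== PORT A =====

-- the 'for option in options: if option in ans: return (True, option)' loop of A
def pvOptLoopA (ans : String) : List String → Bool × String
  | [] => (false, ans)
  | o :: rest => if PySem.Str.isIn o ans then (true, o) else pvOptLoopA ans rest

def fs_cothub_bbh_match_answer (task_data : List (String × List String)) (response : String) : Bool × String :=
  let ans_line := (PySem.Str.split? response "answer is ").getD []
  if ans_line.length = 1 then (false, response)
  else
    let ans := PySem.Str.strip (PySem.List.pyGetD ans_line (-1) "")
    match task_data.find? (fun p => p.1 == "options") with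
    | none => (false, ans)  -- Python raises KeyError here; excluded by Pre_
    | some p =>
      if p.2.isEmpty = false then
        pvOptLoopA ans ["(A)", "(B)", "(C)", "(D)", "(E)", "(F)", "(G)", "(H)", "(I)", "(J)",
          "(K)", "(L)", "(M)", "(N)", "(O)", "(P)", "(Q)", "(R)", "(S)", "(T)", "(U)", "(V)",
          "(W)", "(X)", "(Y)", "(Z)"]
      else
        if PySem.Str.len ans ≠ 0 ∧ PySem.Str.pyGet? ans (-1) = some '.' then
          (true, PySem.Str.slice ans none (some (-1)))
        else (true, ans)

-- ===== PORT B =====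

-- B's single scan: for each window ans[i] ans[i+1] ans[i+2] = '(' X ')' with 'A' ≤ X ≤ 'Z',
-- keep the smallest X seen (strict <, i.e. first occurrence of the minimum)
def pvScanB : List Char → Option Char → Option Char
  | a :: b :: c :: rest, best =>
      let best' :=
        if a = '(' ∧ 'A' ≤ b ∧ b ≤ 'Z' ∧ c = ')' then
          match best with
          | none => some b
          | some m => if b < m then some b else some m
        else best
      pvScanB (b :: c :: rest) best'
  | _, best => best

def fs_cothub_bbh_match_answer_alt (task_data : List (String × List String)) (response : String) : Bool × String :=
  let parts := (PySem.Str.split? response "answer is ").getD []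
  if parts.length = 1 then (false, response)
  else
    let ans := PySem.Str.strip (PySem.List.pyGetD parts (-1) "")
    match task_data.find? (fun p => p.1 == "options") with
    | none => (false, ans)  -- Python raises KeyError here; excluded by Pre_
    | some p =>
      if p.2.isEmpty = false then
        match pvScanB ans.toList none with
        | some m => (true, String.ofList ['(', m, ')'])
        | none => (false, ans)
      else
        if PySem.Str.len ans ≠ 0 ∧ PySem.Str.pyGet? ans (-1) = some '.' then
          (true, PySem.Str.slice ans none (some (-1)))
        else (true, ans)

-- ===== PRECONDITION & SPEC =====
-- Pre_ excludes exactly the inputs where A (and B) raise KeyError: a response containing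
-- 'answer is ' while task_data has no 'options' key.
def Pre_fs_cothub_bbh_match_answer (task_data : List (String × List String)) (response : String) : Prop :=
  PySem.Str.isIn "answer is " response = true → (task_data.find? (fun p => p.1 == "options")).isSome = true
instance (task_data : List (String × List String)) (response : String) : Decidable (Pre_fs_cothub_bbh_match_answer task_data response) := by unfold Pre_fs_cothub_bbh_match_answer; infer_instance

def pvWitness_fs_cothub_bbh_match_answer : (List (String × List String)) × String :=
  ([("options", ["(A) yes", "(B) no"])], "So the answer is (B).")

def Spec_fs_cothub_bbh_match_answer (task_data : List (String × List String)) (response : String) (out : Bool × String) : Prop := out = fs_cothub_bbh_match_answer_alt task_data response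
instance (task_data : List (String × List String)) (response : String) (out : Bool × String) : Decidable (Spec_fs_cothub_bbh_match_answer task_data response out) := by unfold Spec_fs_cothub_bbh_match_answer; infer_instance

-- ===== CLAIM (what is proved, stated in full; the proofs are below) =====
def Claim_equal_fs_cothub_bbh_match_answer : Prop := ∀ (task_data : List (String × List String)) (response : String), Dom_fs_cothub_bbh_match_answer task_data response → Pre_fs_cothub_bbh_match_answer task_data response → Spec_fs_cothub_bbh_match_answer task_data response (fs_cothub_bbh_match_answer task_data response)

-- ===== LEMMAS AND PROOFS =====

-- the letters of the '(X)' windows pvScanB looks at, in order of position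
def pvLetters : List Char → List Char
  | a :: b :: c :: rest =>
      (if a = '(' ∧ 'A' ≤ b ∧ b ≤ 'Z' ∧ c = ')' then [b] else []) ++ pvLetters (b :: c :: rest)
  | _ => []

-- pvScanB's accumulator update, as a named function
def pvStep : Option Char → Char → Option Char
  | none, b => some b
  | some m, b => if b < m then some b else some m

theorem pvScanB_eq_foldl (cs : List Char) (best : Option Char) :
    pvScanB cs best = (pvLetters cs).foldl pvStep best := by
  induction cs generalizing best with
  | nil => simp [pvScanB, pvLetters]
  | cons a tail ih =>
    match tail with
    | [] => simp [pvScanB, pvLetters]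
    | [x] => simp [pvScanB, pvLetters]
    | b :: c :: rest =>
      by_cases h : a = '(' ∧ 'A' ≤ b ∧ b ≤ 'Z' ∧ c = ')'
      · obtain ⟨rfl, h2, h3, rfl⟩ := h
        cases best <;> simp [pvScanB, pvLetters, h2, h3, ih, pvStep]
      · simp [pvScanB, pvLetters, h, ih]

theorem pvLetters_mem (cs : List Char) (b : Char) :
    b ∈ pvLetters cs ↔ ('A' ≤ b ∧ b ≤ 'Z' ∧ ['(', b, ')'] <:+: cs) := by
  induction cs with
  | nil => simp [pvLetters]
  | cons a tail ih =>
    match tail with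
    | [] =>
      simp [pvLetters]
      rintro _ _ h
      have := h.length_le
      simp at this
    | [x] =>
      simp [pvLetters]
      rintro _ _ h
      have := h.length_le
      simp at this
    | x :: y :: rest =>
      have hpre : (['(', b, ')'] <+: a :: x :: y :: rest) ↔ (a = '(' ∧ b = x ∧ y = ')') := by
        simp [List.cons_prefix_cons]
        tauto
      rw [List.infix_cons_iff, hpre]
      by_cases h : a = '(' ∧ 'A' ≤ x ∧ x ≤ 'Z' ∧ y = ')'
      · obtain ⟨rfl, hx1, hx2, rfl⟩ := h
        simp [pvLetters, hx1, hx2, ih]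
        constructor
        · rintro (rfl | ⟨h1, h2, hi⟩)
          · exact ⟨hx1, hx2, Or.inl rfl⟩
          · exact ⟨h1, h2, Or.inr hi⟩
        · rintro ⟨h1, h2, (rfl | hi)⟩
          · exact Or.inl rfl
          · exact Or.inr ⟨h1, h2, hi⟩
      · simp [pvLetters, h, ih]
        intro h1 h2 ha hbx hy
        exact absurd ⟨ha, hbx ▸ h1, hbx ▸ h2, hy⟩ h

theorem pvFoldl_step_some (l : List Char) (m : Char) :
    l.foldl pvStep (some m) = some (l.foldl min m) := by
  induction l generalizing m with
  | nil => rfl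
  | cons a l ih =>
    simp only [List.foldl_cons, pvStep]
    rcases lt_or_ge a m with h | h
    · rw [if_pos h, ih, min_eq_right h.le]
    · rw [if_neg (not_lt.mpr h), ih, min_eq_left h]

theorem pvScanB_none_eq_min? (cs : List Char) :
    pvScanB cs none = (pvLetters cs).min? := by
  rw [pvScanB_eq_foldl]
  cases hl : pvLetters cs with
  | nil => rfl
  | cons a l =>
    rw [List.foldl_cons]
    show List.foldl pvStep (some a) l = _
    rw [pvFoldl_step_some, List.min?_cons']

def pvAlpha : List Char :=
  ['A', 'B', 'C', 'D', 'E', 'F', 'G', 'H', 'I', 'J', 'K', 'L', 'M',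
   'N', 'O', 'P', 'Q', 'R', 'S', 'T', 'U', 'V', 'W', 'X', 'Y', 'Z']

theorem pvMem_alpha (c : Char) (h1 : 'A' ≤ c) (h2 : c ≤ 'Z') : c ∈ pvAlpha := by
  have hn1 : 65 ≤ c.toNat := by
    exact UInt32.le_iff_toNat_le.mp (Char.le_def.mp h1)
  have hn2 : c.toNat ≤ 90 := by
    exact UInt32.le_iff_toNat_le.mp (Char.le_def.mp h2)
  have hc : c = Char.ofNat c.toNat := (Char.ofNat_toNat c).symm
  have hd : c.toNat = 65 ∨ c.toNat = 66 ∨ c.toNat = 67 ∨ c.toNat = 68 ∨ c.toNat = 69 ∨ c.toNat = 70 ∨ c.toNat = 71 ∨ c.toNat = 72 ∨ c.toNat = 73 ∨ c.toNat = 74 ∨ c.toNat = 75 ∨ c.toNat = 76 ∨ c.toNat = 77 ∨ c.toNat = 78 ∨ c.toNat = 79 ∨ c.toNat = 80 ∨ c.toNat = 81 ∨ c.toNat = 82 ∨ c.toNat = 83 ∨ c.toNat = 84 ∨ c.toNat = 85 ∨ c.toNat = 86 ∨ c.toNat = 87 ∨ c.toNat = 88 ∨ c.toNat = 89 ∨ c.toNat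 = 90 := by omega
  rcases hd with h|h|h|h|h|h|h|h|h|h|h|h|h|h|h|h|h|h|h|h|h|h|h|h|h|h <;> (rw [hc, h]; decide)

theorem pvOptLoopA_map (ans : String) (alpha : List Char) :
    pvOptLoopA ans (alpha.map (fun c => String.ofList ['(', c, ')'])) =
      match alpha.find? (fun c => PySem.Str.isIn (String.ofList ['(', c, ')']) ans) with
      | some c => (true, String.ofList ['(', c, ')'])
      | none => (false, ans) := by
  induction alpha with
  | nil => rfl
  | cons a rest ih =>
    simp only [List.map_cons, pvOptLoopA]
    by_cases h : PySem.Str.isIn (String.ofList ['(', a, ')']) ans = true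
    · rw [if_pos h, List.find?_cons_of_pos (p := fun c => PySem.Str.isIn (String.ofList ['(', c, ')']) ans) h]
    · rw [if_neg h, ih, List.find?_cons_of_neg (by simpa using h)]

theorem pvFind_eq_min? (alpha : List Char) (S : List Char) (p : Char → Bool)
    (hs : alpha.Pairwise (· < ·)) (hsub : ∀ b ∈ S, b ∈ alpha)
    (hp : ∀ c ∈ alpha, (p c = true ↔ c ∈ S)) :
    alpha.find? p = S.min? := by
  induction alpha with
  | nil =>
    have : S = [] := List.eq_nil_iff_forall_not_mem.mpr (fun b hb => by simpa using hsub b hb)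
    simp [this]
  | cons a rest ih =>
    rcases List.pairwise_cons.mp hs with ⟨ha, hrest⟩
    by_cases hpa : p a = true
    · rw [List.find?_cons_of_pos hpa]
      have haS : a ∈ S := (hp a (by simp)).mp hpa
      symm
      rw [List.min?_eq_some_iff]
      refine ⟨haS, fun b hb => ?_⟩
      rcases List.mem_cons.mp (hsub b hb) with h | h
      · exact h ▸ le_refl _
      · exact (ha b h).le
    · rw [List.find?_cons_of_neg hpa]
      refine ih hrest (fun b hb => ?_) (fun c hc => hp c (by simp [hc]))
      rcases List.mem_cons.mp (hsub b hb) with h | h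
      · exact absurd ((hp a (by simp)).mpr (h ▸ hb)) hpa
      · exact h

theorem pvBranch_eq (ans : String) :
    pvOptLoopA ans ["(A)", "(B)", "(C)", "(D)", "(E)", "(F)", "(G)", "(H)", "(I)", "(J)",
      "(K)", "(L)", "(M)", "(N)", "(O)", "(P)", "(Q)", "(R)", "(S)", "(T)", "(U)", "(V)",
      "(W)", "(X)", "(Y)", "(Z)"] =
      match pvScanB ans.toList none with
      | some m => (true, String.ofList ['(', m, ')'])
      | none => (false, ans) := by
  have hopts : ["(A)", "(B)", "(C)", "(D)", "(E)", "(F)", "(G)", "(H)", "(I)", "(J)",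
      "(K)", "(L)", "(M)", "(N)", "(O)", "(P)", "(Q)", "(R)", "(S)", "(T)", "(U)", "(V)",
      "(W)", "(X)", "(Y)", "(Z)"] = pvAlpha.map (fun c => String.ofList ['(', c, ')']) := by
    rfl
  rw [hopts, pvOptLoopA_map, pvScanB_none_eq_min?]
  rw [pvFind_eq_min? pvAlpha (pvLetters ans.toList) _ (by decide)
    (fun b hb => by
      rcases (pvLetters_mem _ _).mp hb with ⟨h1, h2, -⟩
      exact pvMem_alpha b h1 h2)
    (fun c hc => by
      have hb : 'A' ≤ c ∧ c ≤ 'Z' := by fin_cases hc <;> exact ⟨by decide, by decide⟩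
      rw [pvLetters_mem]
      constructor
      · intro h
        refine ⟨hb.1, hb.2, ?_⟩
        have := (PySem.Str.isIn_iff_infix _ _).mp h
        simpa using this
      · rintro ⟨-, -, hi⟩
        rw [PySem.Str.isIn_iff_infix]
        simpa using hi)]

-- ===== VERDICT (by name: the statement is the Claim_ definition above) =====
theorem fs_cothub_bbh_match_answer_spec : Claim_equal_fs_cothub_bbh_match_answer := by
  intro td resp _ _
  unfold Spec_fs_cothub_bbh_match_answer
  show fs_cothub_bbh_match_answer td resp = fs_cothub_bbh_match_answer_alt td resp
  simp only [fs_cothub_bbh_match_answer, fs_cothub_bbh_match_answer_alt]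
  by_cases h1 : ((PySem.Str.split? resp "answer is ").getD []).length = 1
  · simp [h1]
  · simp only [if_neg h1]
    cases hf : td.find? (fun p => p.1 == "options") with
    | none => rfl
    | some p =>
      by_cases he : p.2.isEmpty = false
      · simp only [if_pos he]
        rw [pvBranch_eq]
      · simp only [if_neg he]
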